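-- pv_equiv track=rewrite | github.com/timainge/iobox | src/iobox/providers/o365/auth.py | get_microsoft_scopes
-- ===== SOURCE A (Python) =====
-- def get_microsoft_scopes(services: list[str], mode: str) -> list[str]:
--     """Build combined Microsoft scope list for given services and mode.
--
--     Args:
--         services: Subset of ``["email", "calendar", "drive"]``.
--         mode: ``"readonly"`` or ``"standard"`` (dangerous treated as standard).
--
--     Returns:
--         Deduplicated list of Microsoft Graph scope strings.
--     """
--     scopes: list[str] = ["basic"]
--     if "email" in services:
--         if mode == "readonly":
--             scopes.append("Mail.Read")
--         else:
--             scopes.extend(["Mail.ReadWrite", "Mail.Send"])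
--     if "calendar" in services:
--         if mode == "readonly":
--             scopes.append("Calendars.Read")
--         else:
--             scopes.append("Calendars.ReadWrite")
--     if "drive" in services:
--         if mode == "readonly":
--             scopes.append("Files.Read.All")
--         else:
--             scopes.append("Files.ReadWrite.All")
--     # Preserve order, remove duplicates
--     seen: set[str] = set()
--     result: list[str] = []
--     for s in scopes:
--         if s not in seen:
--             seen.add(s)
--             result.append(s)
--     return result
-- ===== SOURCE B (Python) =====
-- # Closed-form lookup: the result depends only on which of the three services are
-- # present and whether mode == "readonly", so all complete outputs are precomputed
-- # and selected by a 3-bit index (email=4, calendar=2, drive=1).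
--
-- READONLY = [
--     ["basic"],
--     ["basic", "Files.Read.All"],
--     ["basic", "Calendars.Read"],
--     ["basic", "Calendars.Read", "Files.Read.All"],
--     ["basic", "Mail.Read"],
--     ["basic", "Mail.Read", "Files.Read.All"],
--     ["basic", "Mail.Read", "Calendars.Read"],
--     ["basic", "Mail.Read", "Calendars.Read", "Files.Read.All"],
-- ]
--
-- STANDARD = [
--     ["basic"],
--     ["basic", "Files.ReadWrite.All"],
--     ["basic", "Calendars.ReadWrite"],
--     ["basic", "Calendars.ReadWrite", "Files.ReadWrite.All"],
--     ["basic", "Mail.ReadWrite", "Mail.Send"],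
--     ["basic", "Mail.ReadWrite", "Mail.Send", "Files.ReadWrite.All"],
--     ["basic", "Mail.ReadWrite", "Mail.Send", "Calendars.ReadWrite"],
--     ["basic", "Mail.ReadWrite", "Mail.Send", "Calendars.ReadWrite", "Files.ReadWrite.All"],
-- ]
--
-- def get_microsoft_scopes(services: list[str], mode: str) -> list[str]:
--     idx = 4 * ("email" in services) + 2 * ("calendar" in services) + ("drive" in services)
--     table = READONLY if mode == "readonly" else STANDARD
--     return list(table[idx])
-- ===== Notes on version B (the rewrite author's own statement) =====
-- stated objective: alternative
-- what changed: Replaced the scope-building if/else cascade plus seen-set dedup loop by a closed-form lookup: all eight complete outputs per mode are precomputed and one is selected by a 3-bit membership bitmask.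
import Mathlib
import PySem

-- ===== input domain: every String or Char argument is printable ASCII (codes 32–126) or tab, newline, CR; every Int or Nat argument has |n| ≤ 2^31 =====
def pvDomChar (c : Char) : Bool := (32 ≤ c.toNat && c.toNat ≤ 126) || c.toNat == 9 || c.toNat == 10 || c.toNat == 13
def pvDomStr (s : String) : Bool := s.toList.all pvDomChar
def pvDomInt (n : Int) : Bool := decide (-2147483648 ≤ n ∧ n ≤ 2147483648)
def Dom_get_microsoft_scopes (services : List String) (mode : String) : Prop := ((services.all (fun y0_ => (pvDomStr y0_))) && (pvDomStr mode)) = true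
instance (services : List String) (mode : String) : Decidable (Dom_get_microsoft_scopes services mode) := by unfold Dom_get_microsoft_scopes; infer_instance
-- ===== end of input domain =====

-- B replaces A's if/else scope-building cascade and dedup loop by a closed-form lookup of the precomputed complete output via a 3-bit membership index (alternative; same cost).


-- ===== PORT A =====
-- Port of A: build scopes via the if-cascade, then the seen/result dedup loop.
def get_microsoft_scopes (services : List String) (mode : String) : List String :=
  let scopes : List String := ["basic"]
  let scopes := if services.contains "email" then
      (if mode == "readonly" then scopes ++ ["Mail.Read"]
       else scopes ++ ["Mail.ReadWrite", "Mail.Send"]) else scopes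
  let scopes := if services.contains "calendar" then
      (if mode == "readonly" then scopes ++ ["Calendars.Read"]
       else scopes ++ ["Calendars.ReadWrite"]) else scopes
  let scopes := if services.contains "drive" then
      (if mode == "readonly" then scopes ++ ["Files.Read.All"]
       else scopes ++ ["Files.ReadWrite.All"]) else scopes
  -- dedup loop: seen-set + result list
  (scopes.foldl (fun (st : PySem.Set String × List String) s =>
      if st.1.contains s then st else (st.1.add s, st.2 ++ [s]))
    (PySem.Set.ofList [], [])).2

-- ===== PORT B =====
-- B's precomputed table of complete outputs, readonly mode, indexed by 4*email+2*calendar+drive.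
def roTable : List (List String) :=
  [["basic"],
   ["basic", "Files.Read.All"],
   ["basic", "Calendars.Read"],
   ["basic", "Calendars.Read", "Files.Read.All"],
   ["basic", "Mail.Read"],
   ["basic", "Mail.Read", "Files.Read.All"],
   ["basic", "Mail.Read", "Calendars.Read"],
   ["basic", "Mail.Read", "Calendars.Read", "Files.Read.All"]]

-- B's precomputed table of complete outputs, standard mode.
def stdTable : List (List String) :=
  [["basic"],
   ["basic", "Files.ReadWrite.All"],
   ["basic", "Calendars.ReadWrite"],
   ["basic", "Calendars.ReadWrite", "Files.ReadWrite.All"],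
   ["basic", "Mail.ReadWrite", "Mail.Send"],
   ["basic", "Mail.ReadWrite", "Mail.Send", "Files.ReadWrite.All"],
   ["basic", "Mail.ReadWrite", "Mail.Send", "Calendars.ReadWrite"],
   ["basic", "Mail.ReadWrite", "Mail.Send", "Calendars.ReadWrite", "Files.ReadWrite.All"]]

-- Port of B: compute the 3-bit membership index and look the answer up (index always in range 0..7).
def get_microsoft_scopes_alt (services : List String) (mode : String) : List String :=
  let idx : Nat := 4 * (if services.contains "email" then 1 else 0)
                 + 2 * (if services.contains "calendar" then 1 else 0)
                 + (if services.contains "drive" then 1 else 0)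
  let table := if mode == "readonly" then roTable else stdTable
  table.getD idx []

-- ===== PRECONDITION & SPEC =====
def Spec_get_microsoft_scopes (services : List String) (mode : String) (out : List String) : Prop := out = get_microsoft_scopes_alt services mode
instance (services : List String) (mode : String) (out : List String) : Decidable (Spec_get_microsoft_scopes services mode out) := by unfold Spec_get_microsoft_scopes; infer_instance

-- ===== CLAIM =====
def Claim_equal_get_microsoft_scopes : Prop := ∀ (services : List String) (mode : String), Dom_get_microsoft_scopes services mode → Spec_get_microsoft_scopes services mode (get_microsoft_scopes services mode)

-- ===== LEMMAS AND PROOFS =====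

-- ===== VERDICT =====
theorem get_microsoft_scopes_spec : Claim_equal_get_microsoft_scopes := by
  intro services mode _
  unfold Spec_get_microsoft_scopes get_microsoft_scopes get_microsoft_scopes_alt
  by_cases h1 : "email" ∈ services <;>
    by_cases h2 : "calendar" ∈ services <;>
      by_cases h3 : "drive" ∈ services <;>
        by_cases hm : mode == "readonly" <;>
          simp [h1, h2, h3, hm, roTable, stdTable, PySem.Set.contains, PySem.Set.add,
                PySem.Set.ofList, List.foldl]
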